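-- pv_equiv track=rewrite | github.com/Prohor67/cse-221-assignments | CSE221LabAssignment01/Task 03/Task 03.py | sorted_marks
-- ===== SOURCE A (Python) =====
-- def sorted_marks(item_no,ID,Mark):
--   for i in range(item_no-1):
--     #max_id
--     max_idx = i
--     for j in range(i+1,item_no):
--       #Comparing marks
--       #Mark in Descending Order
--       if Mark[max_idx] < Mark[j]:
--         max_idx = j
--       #If the marks are equal, then comparing the ID
--       elif Mark[max_idx] == Mark[j]:
--         #ID in Ascending order
--         if ID[max_idx]>ID[j]:
--           max_idx = j
--
--     temp = Mark[i]
--     temp2 = ID[i]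
--     Mark[i] = Mark[max_idx]
--     ID[i] = ID[max_idx]
--     Mark[max_idx] = temp
--     ID[max_idx] = temp2
--    #returning both arrays in a tuple
--   return (ID,Mark)
-- ===== SOURCE B (Python) =====
-- # B: one library sort of the zipped prefix by key (-mark, id), then slice-assignment
-- # write-back; mutates ID and Mark in place like A (return-value + same prefix mutation).
-- def sorted_marks(item_no, ID, Mark):
--     order = sorted(zip(Mark[:item_no], ID[:item_no]), key=lambda p: (-p[0], p[1]))
--     k = len(order)
--     Mark[:k] = [m for m, i in order]
--     ID[:k] = [i for m, i in order]
--     return (ID, Mark)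
-- ===== Notes on version B (the rewrite author's own statement) =====
-- stated objective: faster
-- what changed: Replaces the hand-written O(n^2) in-place selection sort over the two parallel arrays with a single library sort of the zipped prefix by key (-mark, id) and a slice-assignment write-back.
-- outside the precondition, e.g. on sorted_marks(-1, [1, 2, 3], [1, 5, 7]): A returns ([1, 2, 3], [1, 5, 7]), B returns ([2, 1, 3], [5, 1, 7]); on sorted_marks(3, [1, 2], [5, 6]): A raises IndexError, B returns ([2, 1], [6, 5])
import Mathlib
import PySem

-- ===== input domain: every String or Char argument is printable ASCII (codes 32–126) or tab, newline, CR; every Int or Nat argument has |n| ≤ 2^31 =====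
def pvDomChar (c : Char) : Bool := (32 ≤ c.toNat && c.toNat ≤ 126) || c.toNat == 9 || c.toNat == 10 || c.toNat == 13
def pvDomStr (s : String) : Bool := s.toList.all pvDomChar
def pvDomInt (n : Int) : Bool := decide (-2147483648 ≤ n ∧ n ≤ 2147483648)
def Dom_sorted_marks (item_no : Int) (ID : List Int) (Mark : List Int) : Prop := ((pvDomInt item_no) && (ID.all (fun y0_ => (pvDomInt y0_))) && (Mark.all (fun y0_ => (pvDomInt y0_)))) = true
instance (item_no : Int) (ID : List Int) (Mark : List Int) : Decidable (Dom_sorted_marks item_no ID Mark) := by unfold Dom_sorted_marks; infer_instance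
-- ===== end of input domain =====

-- B replaces A's O(n^2) in-place selection sort of the parallel arrays by one library
-- sort of the zipped prefix by key (-mark, id) plus a slice-assignment write-back
-- (objective: faster). Both A and B mutate ID/Mark in place in Python; the equivalence
-- proved here is about the returned pair (which aliases the mutated lists in both).

-- ===== PORT A =====
-- helper of port A: one outer iteration (inner argmax scan over j, then the swap)
def sorted_marks_step (item_no : Int) (s : List Int × List Int) (i : Int) : List Int × List Int :=
  let max_idx : Int :=
    (PySem.List.pyRange (i + 1) item_no).foldl (fun mx j =>
      if PySem.List.pyGetD s.2 mx 0 < PySem.List.pyGetD s.2 j 0 then j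
      else if PySem.List.pyGetD s.2 mx 0 = PySem.List.pyGetD s.2 j 0 then
        (if PySem.List.pyGetD s.1 j 0 < PySem.List.pyGetD s.1 mx 0 then j else mx)
      else mx) i
  let temp := PySem.List.pyGetD s.2 i 0
  let temp2 := PySem.List.pyGetD s.1 i 0
  let mark1 := PySem.List.pySetD s.2 i (PySem.List.pyGetD s.2 max_idx 0)
  let id1 := PySem.List.pySetD s.1 i (PySem.List.pyGetD s.1 max_idx 0)
  let mark2 := PySem.List.pySetD mark1 max_idx temp
  let id2 := PySem.List.pySetD id1 max_idx temp2
  (id2, mark2)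

def sorted_marks (item_no : Int) (ID : List Int) (Mark : List Int) : List Int × List Int :=
  (PySem.List.pyRange 0 (item_no - 1)).foldl (sorted_marks_step item_no) (ID, Mark)

-- ===== PORT B =====
def sorted_marks_alt (item_no : Int) (ID : List Int) (Mark : List Int) : List Int × List Int :=
  let order := PySem.List.sorted2
    ((PySem.List.slice Mark none (some item_no)).zip (PySem.List.slice ID none (some item_no)))
    (fun p => -p.1) (fun p => p.2)
  let k := order.length
  (order.map (fun p => p.2) ++ ID.drop k, order.map (fun p => p.1) ++ Mark.drop k)

-- ===== PRECONDITION & SPEC =====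
-- Pre_ excludes (a) item_no ≥ 2 exceeding a list length, where A raises IndexError, and
-- (b) negative item_no whose Python slice still spans 2+ elements — a count outside
-- the natural domain (A happens to no-op there while B would sort a from-the-end
-- prefix); negative item_no whose slice holds ≤ 1 element stays inside.
def Pre_sorted_marks (item_no : Int) (ID : List Int) (Mark : List Int) : Prop :=
  (0 ≤ item_no ∧ (item_no ≤ 1 ∨ (item_no ≤ (ID.length : Int) ∧ item_no ≤ (Mark.length : Int))))
  ∨ (item_no < 0 ∧ ((ID.length : Int) + item_no ≤ 1 ∨ (Mark.length : Int) + item_no ≤ 1))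
instance (item_no : Int) (ID : List Int) (Mark : List Int) : Decidable (Pre_sorted_marks item_no ID Mark) := by unfold Pre_sorted_marks; infer_instance
def pvWitness_sorted_marks : Int × List Int × List Int := (3, [3, 1, 2], [5, 5, 4])
def Spec_sorted_marks (item_no : Int) (ID : List Int) (Mark : List Int) (out : List Int × List Int) : Prop := out = sorted_marks_alt item_no ID Mark
instance (item_no : Int) (ID : List Int) (Mark : List Int) (out : List Int × List Int) : Decidable (Spec_sorted_marks item_no ID Mark out) := by unfold Spec_sorted_marks; infer_instance

-- ===== CLAIM (what is proved, stated in full; the proofs are below) =====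
def Claim_equal_sorted_marks : Prop := ∀ (item_no : Int) (ID : List Int) (Mark : List Int), Dom_sorted_marks item_no ID Mark → Pre_sorted_marks item_no ID Mark → Spec_sorted_marks item_no ID Mark (sorted_marks item_no ID Mark)

-- ===== LEMMAS AND PROOFS =====

-- the sort key: Python's (-mark, id) tuple, as a lexicographic pair
def pvKey (p : Int × Int) : Lex (Int × Int) := toLex (-p.1, p.2)

def pvSort (l : List (Int × Int)) : List (Int × Int) := PySem.List.sorted l pvKey

lemma pvKey_inj : Function.Injective pvKey := by
  intro a b h
  have h2 : (-a.1, a.2) = (-b.1, b.2) := toLex.injective h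
  rw [Prod.mk.injEq] at h2
  exact Prod.ext (by omega) h2.2

lemma pvKey_lt_iff (a b : Int × Int) :
    pvKey a < pvKey b ↔ (a.1 > b.1 ∨ (a.1 = b.1 ∧ a.2 < b.2)) := by
  simp only [pvKey, Prod.Lex.toLex_lt_toLex]
  constructor
  · rintro (h | ⟨h1, h2⟩)
    · exact Or.inl (by omega)
    · exact Or.inr ⟨by omega, h2⟩
  · rintro (h | ⟨h1, h2⟩)
    · exact Or.inl (by omega)
    · exact Or.inr ⟨by omega, h2⟩

lemma pvKey_le_iff (a b : Int × Int) :
    pvKey a ≤ pvKey b ↔ (a.1 > b.1 ∨ (a.1 = b.1 ∧ a.2 ≤ b.2)) := by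
  rw [← not_lt, pvKey_lt_iff]
  omega

lemma sorted2_eq_pvSort (l : List (Int × Int)) :
    PySem.List.sorted2 l (fun p => -p.1) (fun p => p.2) = pvSort l := by
  unfold PySem.List.sorted2 pvSort PySem.List.sorted
  simp only [if_neg (by decide : ¬ (false = true))]
  have hbe : (fun (a b : Int × Int) => decide (-a.1 < -b.1) || (!decide (-b.1 < -a.1) && decide (a.2 < b.2)))
      = (fun (a b : Int × Int) => decide (pvKey a < pvKey b)) := by
    funext a b
    rw [Bool.eq_iff_iff]
    simp only [Bool.or_eq_true, Bool.and_eq_true, Bool.not_eq_true',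
      decide_eq_true_eq, decide_eq_false_iff_not, pvKey_lt_iff]
    omega
  rw [hbe]

lemma pvSort_getElem_mono (l : List (Int × Int)) {p q : Nat} (hpq : p ≤ q)
    (hq : q < (pvSort l).length) :
    pvKey ((pvSort l)[p]'(lt_of_le_of_lt hpq hq)) ≤ pvKey ((pvSort l)[q]'hq) :=
  PySem.List.key_sorted_getElem_mono l pvKey hpq hq

lemma zip_set (l1 l2 : List Int) (a : Nat) (x y : Int) :
    (l1.set a x).zip (l2.set a y) = (l1.zip l2).set a (x, y) := by
  induction l1 generalizing l2 a with
  | nil => simp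
  | cons h t ih =>
    cases l2 with
    | nil => simp
    | cons h2 t2 =>
      cases a with
      | zero => simp
      | succ a' => simp [ih]

-- the inner j-loop returns an index m with i ≤ m < N whose (mark, id) pair has
-- minimal pvKey among positions i..N-1
lemma inner_spec (idl mk : List Int) (N i : Nat) (hi : i < N) :
    ∃ m : Nat,
      ((PySem.List.pyRange ((i : Int) + 1) (N : Int)).foldl (fun mx j =>
        if PySem.List.pyGetD mk mx 0 < PySem.List.pyGetD mk j 0 then j
        else if PySem.List.pyGetD mk mx 0 = PySem.List.pyGetD mk j 0 then
          (if PySem.List.pyGetD idl j 0 < PySem.List.pyGetD idl mx 0 then j else mx)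
        else mx) (i : Int)) = (m : Int) ∧ i ≤ m ∧ m < N ∧
      ∀ t, i ≤ t → t < N →
        pvKey (mk.getD m 0, idl.getD m 0) ≤ pvKey (mk.getD t 0, idl.getD t 0) := by
  rw [PySem.List.pyRange_one, List.foldl_map]
  have hc : ((N : Int) - ((i : Int) + 1)).toNat = N - i - 1 := by omega
  rw [hc]
  have key : ∀ c : Nat, i + c < N → ∃ m : Nat,
      ((List.range c).foldl (fun (mx : Int) (k : Nat) =>
        if PySem.List.pyGetD mk mx 0 < PySem.List.pyGetD mk ((i : Int) + 1 + (k : Int)) 0 then (i : Int) + 1 + (k : Int)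
        else if PySem.List.pyGetD mk mx 0 = PySem.List.pyGetD mk ((i : Int) + 1 + (k : Int)) 0 then
          (if PySem.List.pyGetD idl ((i : Int) + 1 + (k : Int)) 0 < PySem.List.pyGetD idl mx 0 then (i : Int) + 1 + (k : Int) else mx)
        else mx) (i : Int)) = (m : Int) ∧ i ≤ m ∧ m ≤ i + c ∧
      ∀ t, i ≤ t → t ≤ i + c →
        pvKey (mk.getD m 0, idl.getD m 0) ≤ pvKey (mk.getD t 0, idl.getD t 0) := by
    intro c
    induction c with
    | zero =>
      intro _
      exact ⟨i, by simp, le_refl i, by omega, fun t h1 h2 => by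
        have : t = i := by omega
        subst this; exact le_refl _⟩
    | succ c ih =>
      intro hcN
      obtain ⟨m, hmeq, hm1, hm2, hmin⟩ := ih (by omega)
      rw [List.range_succ, List.foldl_append, hmeq]
      set j : Nat := i + 1 + c with hj
      have hjc : (i : Int) + 1 + (c : Int) = ((j : Nat) : Int) := by omega
      simp only [List.foldl_cons, List.foldl_nil, hjc, PySem.List.pyGetD_natCast]
      by_cases hlt : mk.getD m 0 < mk.getD j 0
      · rw [if_pos hlt]
        refine ⟨j, rfl, by omega, by omega, fun t h1 h2 => ?_⟩
        by_cases ht : t = j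
        · subst ht; exact le_refl _
        · have hjm : pvKey (mk.getD j 0, idl.getD j 0) < pvKey (mk.getD m 0, idl.getD m 0) := by
            rw [pvKey_lt_iff]; left; exact hlt
          exact le_trans (le_of_lt hjm) (hmin t h1 (by omega))
      · rw [if_neg hlt]
        by_cases heq : mk.getD m 0 = mk.getD j 0
        · rw [if_pos heq]
          by_cases hid : idl.getD j 0 < idl.getD m 0
          · rw [if_pos hid]
            refine ⟨j, rfl, by omega, by omega, fun t h1 h2 => ?_⟩
            by_cases ht : t = j
            · subst ht; exact le_refl _
            · have hjm : pvKey (mk.getD j 0, idl.getD j 0) < pvKey (mk.getD m 0, idl.getD m 0) := by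
                rw [pvKey_lt_iff]; right; exact ⟨heq.symm, hid⟩
              exact le_trans (le_of_lt hjm) (hmin t h1 (by omega))
          · rw [if_neg hid]
            refine ⟨m, rfl, hm1, by omega, fun t h1 h2 => ?_⟩
            by_cases ht : t = j
            · subst ht
              rw [pvKey_le_iff]; right; exact ⟨heq, by omega⟩
            · exact hmin t h1 (by omega)
        · rw [if_neg heq]
          refine ⟨m, rfl, hm1, by omega, fun t h1 h2 => ?_⟩
          by_cases ht : t = j
          · subst ht
            rw [pvKey_le_iff]; left; omega
          · exact hmin t h1 (by omega)
  obtain ⟨m, hmeq, hm1, hm2, hmin⟩ := key (N - i - 1) (by omega)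
  exact ⟨m, hmeq, hm1, by omega, fun t h1 h2 => hmin t h1 (by omega)⟩

-- swapping the minimal element to the front extends the sorted prefix by one and
-- keeps the rest a permutation of the remaining sorted tail
lemma swap_spec (S Z : List (Int × Int)) (n i m : Nat)
    (hZ : Z.length = n) (hS : S.length = n) (him : i ≤ m) (hm : m < n)
    (h5 : Z.take i = S.take i) (h6 : (Z.drop i).Perm (S.drop i))
    (hZm : Z.getD m (0,0) = S.getD i (0,0)) :
    ((Z.set i (Z.getD m (0,0))).set m (Z.getD i (0,0))).take (i+1) = S.take (i+1) ∧
    (((Z.set i (Z.getD m (0,0))).set m (Z.getD i (0,0))).drop (i+1)).Perm (S.drop (i+1)) := by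
  have hiZ : i < Z.length := by omega
  have hmZ : m < Z.length := by omega
  have hiS : i < S.length := by omega
  have hgm : Z.getD m (0,0) = Z[m] := List.getD_eq_getElem Z (0,0) hmZ
  have hgi : Z.getD i (0,0) = Z[i] := List.getD_eq_getElem Z (0,0) hiZ
  have hZmS : Z[m] = S[i] := by
    rw [← hgm, hZm, List.getD_eq_getElem S (0,0) hiS]
  have hStake : S.take (i+1) = S.take i ++ [S[i]] := by
    rw [List.take_succ, List.getElem?_eq_getElem hiS]
    rfl
  have hSdrop : S.drop i = S[i] :: S.drop (i+1) := List.drop_eq_getElem_cons hiS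
  rcases Nat.eq_or_lt_of_le him with heq | hlt
  · -- m = i : the swap is a no-op
    subst heq
    rw [hgm, List.set_set, List.set_getElem_self]
    constructor
    · rw [List.take_succ, List.getElem?_eq_getElem hiZ, hStake, h5]
      simp [hZmS]
    · have hZdrop : Z.drop i = Z[i] :: Z.drop (i+1) := List.drop_eq_getElem_cons hiZ
      rw [hZdrop, hSdrop, hZmS] at h6
      exact h6.cons_inv
  · -- i < m : a genuine swap
    rw [hgm, hgi]
    set u := Z.drop (i+1) with hu
    set k := m - i - 1 with hk
    have hku : k < u.length := by
      rw [hu, List.length_drop]; omega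
    have hiklen : (Z.take i).length = i := by
      rw [List.length_take]; omega
    have hset1 : Z.set i Z[m] = Z.take i ++ Z[m] :: u := by
      rw [List.set_eq_take_append_cons_drop, if_pos hiZ]
    have hset2 : (Z.set i Z[m]).set m Z[i] = Z.take i ++ Z[m] :: u.set k Z[i] := by
      rw [hset1, List.set_append_right _ _ (by omega), hiklen]
      have : m - i = (m - i - 1) + 1 := by omega
      rw [this, List.set_cons_succ]
    have hm' : i + 1 + k = m := by omega
    have huk : u[k]'hku = Z[m] := by
      simp only [hu, List.getElem_drop, hm']
    have hudec : u = u.take k ++ u[k]'hku :: u.drop (k+1) := by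
      conv_lhs => rw [← List.take_append_drop k u]
      rw [List.drop_eq_getElem_cons hku]
    have huset : u.set k Z[i] = u.take k ++ Z[i] :: u.drop (k+1) := by
      rw [List.set_eq_take_append_cons_drop, if_pos hku]
    have hZdrop : Z.drop i = Z[i] :: u := by
      rw [hu, ← List.drop_eq_getElem_cons hiZ]
    constructor
    · rw [hset2, List.take_append, hiklen]
      have h1 : i + 1 - i = 1 := by omega
      rw [h1, List.take_take, min_eq_right (by omega), h5, hStake]
      simp [hZmS]
    · rw [hset2, List.drop_append, hiklen]
      have h1 : i + 1 - i = 1 := by omega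
      rw [List.drop_eq_nil_of_le (by rw [List.length_take]; omega), h1, List.nil_append,
        List.drop_one, List.tail_cons]
      -- goal: (u.set k Z[i]).Perm (S.drop (i+1))
      have p1 : (S[i] :: u.set k Z[i]).Perm (Z.drop i) := by
        rw [huset, hZdrop]
        have a2 : (S[i] :: (u.take k ++ Z[i] :: u.drop (k+1))).Perm
            (S[i] :: Z[i] :: (u.take k ++ u.drop (k+1))) := (List.perm_middle).cons _
        have a4 : (S[i] :: (u.take k ++ u.drop (k+1))).Perm u := by
          conv_rhs => rw [hudec]
          rw [← hZmS, ← huk]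
          exact List.perm_middle.symm
        exact a2.trans ((List.Perm.swap _ _ _).trans (a4.cons _))
      have p2 := p1.trans h6
      rw [hSdrop] at p2
      exact p2.cons_inv

-- the outer-loop invariant, transported through one iteration of sorted_marks_step
lemma step_inv (ID Mark : List Int) (N : Nat)
    (hI : N ≤ ID.length) (hM : N ≤ Mark.length)
    (i : Nat) (hi : i < N) (s : List Int × List Int)
    (h1 : s.1.length = ID.length) (h2 : s.2.length = Mark.length)
    (h3 : s.1.drop N = ID.drop N) (h4 : s.2.drop N = Mark.drop N)
    (h5 : ((s.2.take N).zip (s.1.take N)).take i = (pvSort ((Mark.take N).zip (ID.take N))).take i)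
    (h6 : (((s.2.take N).zip (s.1.take N)).drop i).Perm ((pvSort ((Mark.take N).zip (ID.take N))).drop i)) :
    (sorted_marks_step (N : Int) s (i : Int)).1.length = ID.length ∧
    (sorted_marks_step (N : Int) s (i : Int)).2.length = Mark.length ∧
    (sorted_marks_step (N : Int) s (i : Int)).1.drop N = ID.drop N ∧
    (sorted_marks_step (N : Int) s (i : Int)).2.drop N = Mark.drop N ∧
    (((sorted_marks_step (N : Int) s (i : Int)).2.take N).zip ((sorted_marks_step (N : Int) s (i : Int)).1.take N)).take (i+1)
      = (pvSort ((Mark.take N).zip (ID.take N))).take (i+1) ∧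
    ((((sorted_marks_step (N : Int) s (i : Int)).2.take N).zip ((sorted_marks_step (N : Int) s (i : Int)).1.take N)).drop (i+1)).Perm
      ((pvSort ((Mark.take N).zip (ID.take N))).drop (i+1)) := by
  obtain ⟨idl, mk⟩ := s
  simp only at h1 h2 h3 h4 h5 h6 ⊢
  obtain ⟨m, hmeq, hm1, hm2, hmin⟩ := inner_spec idl mk N i hi
  have hIl : N ≤ idl.length := by omega
  have hMl : N ≤ mk.length := by omega
  have hZlen : ((mk.take N).zip (idl.take N)).length = N := by
    rw [List.length_zip, List.length_take, List.length_take]; omega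
  have hZ0len : ((Mark.take N).zip (ID.take N)).length = N := by
    rw [List.length_zip, List.length_take, List.length_take]; omega
  have hSlen : (pvSort ((Mark.take N).zip (ID.take N))).length = N := by
    unfold pvSort; rw [PySem.List.length_sorted, hZ0len]
  have hZget : ∀ t, t < N →
      ((mk.take N).zip (idl.take N)).getD t (0,0) = (mk.getD t 0, idl.getD t 0) := by
    intro t ht
    have hb : t < ((mk.take N).zip (idl.take N)).length := by omega
    rw [List.getD_eq_getElem _ _ hb, List.getElem_zip, List.getElem_take, List.getElem_take,
      List.getD_eq_getElem _ _ (by omega), List.getD_eq_getElem _ _ (by omega)]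
  -- the selected pair is THE minimum, i.e. equals the sorted list's i-th element
  have hZmS : ((mk.take N).zip (idl.take N)).getD m (0,0)
      = (pvSort ((Mark.take N).zip (ID.take N))).getD i (0,0) := by
    set S := pvSort ((Mark.take N).zip (ID.take N)) with hSdef
    set Z := (mk.take N).zip (idl.take N) with hZdef
    have hiS : i < S.length := by omega
    have hmZ : m < Z.length := by omega
    have hiZ : i < Z.length := by omega
    have hSi_mem : S[i] ∈ Z.drop i := by
      refine (h6.mem_iff).mpr ?_
      rw [List.drop_eq_getElem_cons (by omega : i < S.length)]
      exact List.mem_cons_self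
    obtain ⟨j, hj, hjeq⟩ := List.mem_iff_getElem.mp hSi_mem
    rw [List.getElem_drop] at hjeq
    have hjN : i + j < N := by
      rw [List.length_drop] at hj; omega
    have hZm_mem : Z[m] ∈ S.drop i := by
      refine (h6.mem_iff).mp ?_
      refine List.mem_iff_getElem.mpr ⟨m - i, by rw [List.length_drop]; omega, ?_⟩
      rw [List.getElem_drop]
      congr 1
      omega
    obtain ⟨j2, hj2, hj2eq⟩ := List.mem_iff_getElem.mp hZm_mem
    rw [List.getElem_drop] at hj2eq
    have hj2N : i + j2 < N := by
      rw [List.length_drop] at hj2; omega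
    have hq2 : i + j2 < (pvSort ((List.take N Mark).zip (List.take N ID))).length := by
      rw [← hSdef]; omega
    have kmono : pvKey (S[i]) ≤ pvKey (S[(i+j2)]'(by omega)) :=
      pvSort_getElem_mono _ (by omega) hq2
    have k1 : pvKey (Z[m]) ≤ pvKey (Z[(i+j)]'(by omega)) := by
      have := hmin (i + j) (by omega) (by omega)
      rw [← hZget m (by omega), ← hZget (i + j) (by omega)] at this
      rw [List.getD_eq_getElem _ _ hmZ, List.getD_eq_getElem _ _ (by omega : i + j < Z.length)] at this
      exact this
    rw [hjeq] at k1
    rw [hj2eq] at kmono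
    have hkeq : pvKey (Z[m]) = pvKey (S[i]) := le_antisymm k1 kmono
    have := pvKey_inj hkeq
    rw [List.getD_eq_getElem _ _ hmZ, List.getD_eq_getElem _ _ hiS, this]
  have hswap := swap_spec (pvSort ((Mark.take N).zip (ID.take N))) ((mk.take N).zip (idl.take N))
    N i m hZlen hSlen hm1 hm2 h5 h6 hZmS
  have hstep : sorted_marks_step (N : Int) (idl, mk) (i : Int)
      = ((idl.set i (idl.getD m 0)).set m (idl.getD i 0),
         (mk.set i (mk.getD m 0)).set m (mk.getD i 0)) := by
    unfold sorted_marks_step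
    dsimp only
    rw [hmeq]
    simp only [PySem.List.pyGetD_natCast, PySem.List.pySetD_natCast]
  have hzip : ((((mk.set i (mk.getD m 0)).set m (mk.getD i 0)).take N).zip
        (((idl.set i (idl.getD m 0)).set m (idl.getD i 0)).take N))
      = ((((mk.take N).zip (idl.take N)).set i (((mk.take N).zip (idl.take N)).getD m (0,0))).set m
          (((mk.take N).zip (idl.take N)).getD i (0,0))) := by
    rw [List.take_set, List.take_set, List.take_set, List.take_set, zip_set, zip_set,
      ← hZget m hm2, ← hZget i hi]
  refine ⟨?_, ?_, ?_, ?_, ?_, ?_⟩ <;> rw [hstep]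
  · simp [h1]
  · simp [h2]
  · dsimp only
    rw [List.drop_set, if_pos (by omega), List.drop_set, if_pos (by omega), h3]
  · dsimp only
    rw [List.drop_set, if_pos (by omega), List.drop_set, if_pos (by omega), h4]
  · dsimp only
    rw [hzip]
    exact hswap.1
  · dsimp only
    rw [hzip]
    exact hswap.2

-- main lemma: for 1 ≤ N within both lengths, A's fold produces the sorted prefix
lemma sorted_marks_eq_sorted (ID Mark : List Int) (N : Nat) (hN : 1 ≤ N)
    (hI : N ≤ ID.length) (hM : N ≤ Mark.length) :
    sorted_marks (N : Int) ID Mark =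
      ((pvSort ((Mark.take N).zip (ID.take N))).map Prod.snd ++ ID.drop N,
       (pvSort ((Mark.take N).zip (ID.take N))).map Prod.fst ++ Mark.drop N) := by
  unfold sorted_marks
  have hN1 : (((N : Int) - 1) - 0).toNat = N - 1 := by omega
  rw [PySem.List.pyRange_one, hN1, List.foldl_map]
  simp only [zero_add]
  have main : ∀ i, i ≤ N - 1 →
      ((List.range i).foldl (fun s (k : Nat) => sorted_marks_step (N : Int) s (k : Int)) (ID, Mark)).1.length = ID.length ∧
      ((List.range i).foldl (fun s (k : Nat) => sorted_marks_step (N : Int) s (k : Int)) (ID, Mark)).2.length = Mark.length ∧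
      ((List.range i).foldl (fun s (k : Nat) => sorted_marks_step (N : Int) s (k : Int)) (ID, Mark)).1.drop N = ID.drop N ∧
      ((List.range i).foldl (fun s (k : Nat) => sorted_marks_step (N : Int) s (k : Int)) (ID, Mark)).2.drop N = Mark.drop N ∧
      ((((List.range i).foldl (fun s (k : Nat) => sorted_marks_step (N : Int) s (k : Int)) (ID, Mark)).2.take N).zip
        (((List.range i).foldl (fun s (k : Nat) => sorted_marks_step (N : Int) s (k : Int)) (ID, Mark)).1.take N)).take i
        = (pvSort ((Mark.take N).zip (ID.take N))).take i ∧
      (((((List.range i).foldl (fun s (k : Nat) => sorted_marks_step (N : Int) s (k : Int)) (ID, Mark)).2.take N).zip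
        (((List.range i).foldl (fun s (k : Nat) => sorted_marks_step (N : Int) s (k : Int)) (ID, Mark)).1.take N)).drop i).Perm
        ((pvSort ((Mark.take N).zip (ID.take N))).drop i) := by
    intro i
    induction i with
    | zero =>
      intro _
      refine ⟨rfl, rfl, rfl, rfl, by simp, ?_⟩
      simp only [List.range_zero, List.foldl_nil, List.drop_zero]
      exact (PySem.List.sorted_perm ((Mark.take N).zip (ID.take N)) pvKey false).symm
    | succ i ih =>
      intro hle
      obtain ⟨p1, p2, p3, p4, p5, p6⟩ := ih (by omega)
      rw [List.range_succ, List.foldl_append, List.foldl_cons, List.foldl_nil]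
      exact step_inv ID Mark N hI hM i (by omega) _ p1 p2 p3 p4 p5 p6
  obtain ⟨l1, l2, d1, d2, ht, hp⟩ := main (N - 1) (le_refl _)
  set F := (List.range (N - 1)).foldl (fun s (k : Nat) => sorted_marks_step (N : Int) s (k : Int)) (ID, Mark) with hFdef
  have hZ0len : ((Mark.take N).zip (ID.take N)).length = N := by
    rw [List.length_zip, List.length_take, List.length_take]; omega
  have hSlen : (pvSort ((Mark.take N).zip (ID.take N))).length = N := by
    unfold pvSort; rw [PySem.List.length_sorted, hZ0len]
  have hZflen : ((F.2.take N).zip (F.1.take N)).length = N := by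
    rw [List.length_zip, List.length_take, List.length_take]; omega
  have hN1' : N - 1 < (pvSort ((Mark.take N).zip (ID.take N))).length := by omega
  have hSdropLast : (pvSort ((Mark.take N).zip (ID.take N))).drop (N - 1)
      = [(pvSort ((Mark.take N).zip (ID.take N)))[N - 1]'hN1'] := by
    rw [List.drop_eq_getElem_cons hN1']
    have hnil : (pvSort ((Mark.take N).zip (ID.take N))).drop (N - 1 + 1) = [] :=
      List.drop_eq_nil_of_le (by omega)
    rw [hnil]
  rw [hSdropLast] at hp
  have h9 := List.perm_singleton.mp hp
  have hZf : (F.2.take N).zip (F.1.take N) = pvSort ((Mark.take N).zip (ID.take N)) := by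
    calc (F.2.take N).zip (F.1.take N)
        = ((F.2.take N).zip (F.1.take N)).take (N-1) ++ ((F.2.take N).zip (F.1.take N)).drop (N-1) :=
          (List.take_append_drop _ _).symm
      _ = (pvSort ((Mark.take N).zip (ID.take N))).take (N-1) ++ (pvSort ((Mark.take N).zip (ID.take N))).drop (N-1) := by
          rw [ht, h9, hSdropLast]
      _ = pvSort ((Mark.take N).zip (ID.take N)) := List.take_append_drop _ _
  have hmk : F.2.take N = (pvSort ((Mark.take N).zip (ID.take N))).map Prod.fst := by
    rw [← hZf, List.map_fst_zip (by rw [List.length_take, List.length_take]; omega)]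
  have hid : F.1.take N = (pvSort ((Mark.take N).zip (ID.take N))).map Prod.snd := by
    rw [← hZf, List.map_snd_zip (by rw [List.length_take, List.length_take]; omega)]
  have e1 : F.1 = (pvSort ((Mark.take N).zip (ID.take N))).map Prod.snd ++ ID.drop N := by
    rw [← hid, ← d1]; exact (List.take_append_drop _ _).symm
  have e2 : F.2 = (pvSort ((Mark.take N).zip (ID.take N))).map Prod.fst ++ Mark.drop N := by
    rw [← hmk, ← d2]; exact (List.take_append_drop _ _).symm
  exact Prod.ext e1 e2

-- ===== VERDICT (by name: the statement is the Claim_ definition above) =====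
theorem sorted_marks_spec : Claim_equal_sorted_marks := by
  intro n ID Mark _ hpre
  unfold Spec_sorted_marks
  rcases hpre with ⟨h0, hcase⟩ | ⟨hneg, hor⟩
  swap
  · -- negative item_no with an empty slice: both sides are the identity
    have hA : sorted_marks n ID Mark = (ID, Mark) := by
      unfold sorted_marks
      rw [PySem.List.pyRange_one]
      have hz : ((n - 1) - 0).toNat = 0 := by omega
      rw [hz]
      rfl
    rw [hA]
    have hk : 0 < (-n).toNat := by omega
    have hn : n = -(((-n).toNat : Nat) : Int) := by omega
    have hsM : PySem.List.slice Mark none (some n) = Mark.take (Mark.length - (-n).toNat) := by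
      conv_lhs => rw [hn]
      exact PySem.List.slice_to_neg_natCast Mark _ hk
    have hsI : PySem.List.slice ID none (some n) = ID.take (ID.length - (-n).toNat) := by
      conv_lhs => rw [hn]
      exact PySem.List.slice_to_neg_natCast ID _ hk
    simp only [sorted_marks_alt]
    rw [sorted2_eq_pvSort, hsM, hsI]
    have hlen : ((Mark.take (Mark.length - (-n).toNat)).zip (ID.take (ID.length - (-n).toNat))).length ≤ 1 := by
      rw [List.length_zip, List.length_take, List.length_take]
      omega
    rcases Nat.le_one_iff_eq_zero_or_eq_one.mp hlen with h0 | h1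
    · rw [List.length_eq_zero_iff.mp h0]
      simp [pvSort, PySem.List.sorted]
    · obtain ⟨p, hp⟩ := List.length_eq_one_iff.mp h1
      have hMpos : 0 < Mark.length - (-n).toNat := by
        by_contra hc
        rw [List.length_zip, List.length_take, List.length_take] at h1
        omega
      have hIpos : 0 < ID.length - (-n).toNat := by
        by_contra hc
        rw [List.length_zip, List.length_take, List.length_take] at h1
        omega
      have hMlen : 0 < Mark.length := by omega
      have hIlen : 0 < ID.length := by omega
      have hb0 : 0 < ((Mark.take (Mark.length - (-n).toNat)).zip (ID.take (ID.length - (-n).toNat))).length := by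
        omega
      have h00 : ((Mark.take (Mark.length - (-n).toNat)).zip (ID.take (ID.length - (-n).toNat)))[0]'hb0
          = (Mark[0]'hMlen, ID[0]'hIlen) := by
        rw [List.getElem_zip]
        simp [List.getElem_take]
      have hp0 : p = (Mark[0]'hMlen, ID[0]'hIlen) := by
        rw [← h00]
        simp [hp]
      rw [hp, hp0]
      have hsort : pvSort [(Mark[0]'hMlen, ID[0]'hIlen)] = [(Mark[0]'hMlen, ID[0]'hIlen)] := rfl
      rw [hsort]
      simp only [List.map_cons, List.map_nil, List.length_cons, List.length_nil, Nat.zero_add,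
        List.singleton_append]
      have eI : ID = ID[0]'hIlen :: ID.drop 1 := by
        have h := List.drop_eq_getElem_cons (i := 0) (l := ID) hIlen
        simpa using h
      have eM : Mark = Mark[0]'hMlen :: Mark.drop 1 := by
        have h := List.drop_eq_getElem_cons (i := 0) (l := Mark) hMlen
        simpa using h
      exact Prod.ext eI eM
  by_cases hmain : 1 ≤ n ∧ n ≤ (ID.length : Int) ∧ n ≤ (Mark.length : Int)
  · obtain ⟨hn1, hnI, hnM⟩ := hmain
    have hn' : n = ((n.toNat : Nat) : Int) := by omega
    have hres := sorted_marks_eq_sorted ID Mark n.toNat (by omega) (by omega) (by omega)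
    rw [hn', hres]
    simp only [sorted_marks_alt]
    rw [PySem.List.slice_to Mark (by omega), PySem.List.slice_to ID (by omega), sorted2_eq_pvSort]
    simp only [Int.toNat_natCast]
    have hlen : (pvSort ((Mark.take n.toNat).zip (ID.take n.toNat))).length = n.toNat := by
      unfold pvSort
      rw [PySem.List.length_sorted, List.length_zip, List.length_take, List.length_take]
      omega
    rw [hlen]
  · have hn1 : n ≤ 1 := by
      rcases hcase with h | ⟨hb1, hb2⟩
      · exact h
      · by_contra hgt
        exact hmain ⟨by omega, hb1, hb2⟩
    have hA : sorted_marks n ID Mark = (ID, Mark) := by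
      unfold sorted_marks
      rw [PySem.List.pyRange_one]
      have hz : ((n - 1) - 0).toNat = 0 := by omega
      rw [hz]
      rfl
    rw [hA]
    have hzip : (PySem.List.slice Mark none (some n)).zip (PySem.List.slice ID none (some n)) = [] := by
      rw [PySem.List.slice_to Mark h0, PySem.List.slice_to ID h0]
      rcases (by omega : n = 0 ∨ n = 1) with h | h
      · subst h
        simp
      · have hnil : ID = [] ∨ Mark = [] := by
          rcases hcase with hle | ⟨hb1, hb2⟩
          · by_cases hI0 : ID = []
            · exact Or.inl hI0
            · by_cases hM0 : Mark = []
              · exact Or.inr hM0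
              · exfalso
                have l1 : 1 ≤ ID.length := List.length_pos_iff.mpr hI0
                have l2 : 1 ≤ Mark.length := List.length_pos_iff.mpr hM0
                exact hmain ⟨by omega, by exact_mod_cast by omega, by exact_mod_cast by omega⟩
          · exact absurd ⟨by omega, hb1, hb2⟩ hmain
        rcases hnil with hh | hh <;> subst hh <;> simp
    simp only [sorted_marks_alt]
    rw [sorted2_eq_pvSort, hzip]
    simp [pvSort, PySem.List.sorted]
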